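-- pv_equiv track=rewrite | github.com/6210qwe/leetcode_py | leetcode_solutions/by_id/q0489.py | kth_smallest_instructions
-- ===== SOURCE A (Python) =====
-- from typing import List, Optional
-- from math import comb
--
-- def kth_smallest_instructions(destination: List[int]) -> str:
--     """
--     函数式接口 - 返回按字典序排列后的第 k 条最小指令
--
--     实现思路:
--     使用组合数学计算每一步选择 'H' 或 'V' 的可能性，并根据 k 选择合适的路径。
--
--     Args:
--         destination: 目的地坐标 [row, column]
--
--     Returns:
--         按字典序排列后的第 k 条最小指令
--
--     Example:
--         >>> kth_smallest_instructions([2, 3])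
--         "HHHVV"
--     """
--     def find_kth_path(k: int, h: int, v: int) -> str:
--         path = []
--         while h > 0 and v > 0:
--             # 计算当前选择 'H' 的组合数
--             if k > comb(h + v - 1, v):
--                 path.append('V')
--                 k -= comb(h + v - 1, v)
--                 v -= 1
--             else:
--                 path.append('H')
--                 h -= 1
--         path.extend(['H'] * h)
--         path.extend(['V'] * v)
--         return ''.join(path)
--
--     row, col = destination
--     total = row + col
--     h = col
--     v = row
--     return find_kth_path(1, h, v)
-- ===== SOURCE B (Python) =====
-- from typing import List
--
-- def kth_smallest_instructions(destination: List[int]) -> str: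
--     # k is hardcoded to 1, so the lexicographically smallest path is all H's then all V's.
--     row, col = destination
--     return "H" * col + "V" * row
-- ===== Notes on version B (the rewrite author's own statement) =====
-- stated objective: simpler
-- what changed: Replaced the combinatorial while-loop (math.comb at each step) by the closed form "H"*col + "V"*row, valid because k is hardcoded to 1 so the loop always takes the 'H' branch.
import Mathlib
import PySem

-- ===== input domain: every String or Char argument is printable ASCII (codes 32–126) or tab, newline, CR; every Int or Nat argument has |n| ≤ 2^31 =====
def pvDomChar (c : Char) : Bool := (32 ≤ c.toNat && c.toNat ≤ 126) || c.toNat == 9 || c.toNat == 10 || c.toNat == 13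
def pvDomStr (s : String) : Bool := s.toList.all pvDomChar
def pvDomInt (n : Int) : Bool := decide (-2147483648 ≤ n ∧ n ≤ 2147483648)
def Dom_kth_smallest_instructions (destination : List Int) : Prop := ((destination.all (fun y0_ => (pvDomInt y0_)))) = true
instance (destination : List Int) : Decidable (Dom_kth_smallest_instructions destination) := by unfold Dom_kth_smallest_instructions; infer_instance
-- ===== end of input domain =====

-- B replaces A's combinatorial while-loop by the closed form "H"*col + "V"*row (k is hardcoded 1, so A's loop always takes the 'H' branch).


-- ===== PORT A =====
-- inner helper find_kth_path: while h > 0 and v > 0 pick 'V' or 'H' by comparing k with comb(h+v-1, v);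
-- then append 'H'*h and 'V'*v.  The while-loop is the obvious recursion, decreasing in h+v.
def findKthPath (k h v : Int) : List Char :=
  if hp : h > 0 ∧ v > 0 then
    if k > (Nat.choose (h + v - 1).toNat v.toNat : Int) then
      'V' :: findKthPath (k - (Nat.choose (h + v - 1).toNat v.toNat : Int)) h (v - 1)
    else
      'H' :: findKthPath k (h - 1) v
  else
    List.replicate h.toNat 'H' ++ List.replicate v.toNat 'V'
  termination_by (h + v).toNat
  decreasing_by all_goals omega

def kth_smallest_instructions (destination : List Int) : String :=
  match destination with
  | [row, col] => String.ofList (findKthPath 1 col row)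
  | _ => ""  -- Python raises ValueError on unpacking; excluded by Pre_

-- ===== PORT B =====
def kth_smallest_instructions_alt (destination : List Int) : String :=
  -- 'row, col = destination' (length-2 unpack; other lengths raise and are excluded by Pre_)
  let row := destination.headD 0
  let col := (destination.drop 1).headD 0
  String.ofList (List.replicate col.toNat 'H' ++ List.replicate row.toNat 'V')

-- ===== PRECONDITION & SPEC =====
-- A unpacks 'row, col = destination': it raises ValueError unless the list has exactly two elements.
def Pre_kth_smallest_instructions (destination : List Int) : Prop := destination.length = 2
instance (destination : List Int) : Decidable (Pre_kth_smallest_instructions destination) := by unfold Pre_kth_smallest_instructions; infer_instance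

def pvWitness_kth_smallest_instructions : List Int := [2, 3]

def Spec_kth_smallest_instructions (destination : List Int) (out : String) : Prop := out = kth_smallest_instructions_alt destination
instance (destination : List Int) (out : String) : Decidable (Spec_kth_smallest_instructions destination out) := by unfold Spec_kth_smallest_instructions; infer_instance

-- ===== CLAIM (what is proved, stated in full; the proofs are below) =====
def Claim_equal_kth_smallest_instructions : Prop := ∀ (destination : List Int), Dom_kth_smallest_instructions destination → Pre_kth_smallest_instructions destination → Spec_kth_smallest_instructions destination (kth_smallest_instructions destination)

-- ===== LEMMAS AND PROOFS =====

-- With k = 1, the comparison 1 > comb(h+v-1, v) never holds (the comb is ≥ 1 since v ≤ h+v-1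
-- whenever h > 0 and v > 0), so the loop always takes the 'H' branch until h reaches 0.
theorem findKthPath_one (h v : Int) :
    findKthPath 1 h v = List.replicate h.toNat 'H' ++ List.replicate v.toNat 'V' := by
  by_cases hp : h > 0 ∧ v > 0
  · have hle : v.toNat ≤ (h + v - 1).toNat := by omega
    have hpos : (0 : Nat) < Nat.choose (h + v - 1).toNat v.toNat := Nat.choose_pos hle
    have hnot : ¬ ((1 : Int) > (Nat.choose (h + v - 1).toNat v.toNat : Int)) := by
      exact_mod_cast Nat.not_lt.mpr hpos
    rw [findKthPath, dif_pos hp, if_neg hnot, findKthPath_one (h - 1) v]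
    have : h.toNat = (h - 1).toNat + 1 := by omega
    rw [this, List.replicate_succ, List.cons_append]
  · rw [findKthPath, dif_neg hp]
  termination_by (h + v).toNat
  decreasing_by omega

-- ===== VERDICT (by name: the statement is the Claim_ definition above) =====
theorem kth_smallest_instructions_spec : Claim_equal_kth_smallest_instructions := by
  intro destination _ hpre
  match destination, hpre with
  | [row, col], _ =>
    simp only [Spec_kth_smallest_instructions, kth_smallest_instructions,
      kth_smallest_instructions_alt, findKthPath_one, List.headD, List.drop]
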